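-- pv_equiv track=rewrite | github.com/TLparche/IMMS-AI | gateway/routers/websocket.py | find_longest_normalized_overlap
-- ===== SOURCE A (Python) =====
-- def normalize_transcript_for_dedupe(text: str) -> str:
--     return "".join(ch for ch in (text or "").lower().strip() if ch.isalnum())
--
-- def find_longest_normalized_overlap(previous_text: str, current_text: str) -> int:
--     previous = normalize_transcript_for_dedupe(previous_text)
--     current = normalize_transcript_for_dedupe(current_text)
--     if not previous or not current:
--         return 0
--     max_len = min(len(previous), len(current))
--     for size in range(max_len, 12, -1):
--         if previous[-size:] == current[:size]:
--             return size
--     return 0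
-- ===== SOURCE B (Python) =====
-- def _normalize(text: str) -> str:
--     return "".join(ch for ch in text.lower() if ch.isalnum())
--
-- def find_longest_normalized_overlap(previous_text: str, current_text: str) -> int:
--     previous = _normalize(previous_text)
--     current = _normalize(current_text)
--     # KMP prefix function on current + sentinel + previous; the final value is the
--     # length of the longest suffix of `previous` that equals a prefix of `current`.
--     s = current + "\x00" + previous
--     pi = [0] * len(s)
--     k = 0
--     for i in range(1, len(s)):
--         while k > 0 and s[i] != s[k]:
--             k = pi[k - 1]
--         if s[i] == s[k]:
--             k += 1
--         pi[i] = k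
--     return k if k > 12 else 0
-- ===== Notes on version B (the rewrite author's own statement) =====
-- stated objective: faster
-- what changed: Replaces A's descending brute-force scan that re-slices and compares suffix/prefix pairs of every candidate length with a single KMP prefix-function pass over current + sentinel + previous whose final border length is the longest overlap.
import Mathlib
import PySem

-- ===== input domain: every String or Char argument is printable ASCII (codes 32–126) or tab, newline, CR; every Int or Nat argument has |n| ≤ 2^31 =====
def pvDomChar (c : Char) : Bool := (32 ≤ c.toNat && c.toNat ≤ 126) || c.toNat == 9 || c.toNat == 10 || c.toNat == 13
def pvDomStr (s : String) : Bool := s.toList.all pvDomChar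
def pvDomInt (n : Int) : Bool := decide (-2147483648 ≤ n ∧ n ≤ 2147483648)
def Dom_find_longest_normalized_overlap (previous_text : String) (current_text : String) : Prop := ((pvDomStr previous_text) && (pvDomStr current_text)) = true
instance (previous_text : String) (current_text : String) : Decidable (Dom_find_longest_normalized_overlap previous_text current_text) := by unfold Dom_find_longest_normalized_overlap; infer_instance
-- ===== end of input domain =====

-- B replaces A's descending brute-force suffix/prefix scan by one KMP prefix-function
-- pass over current + sentinel + previous (objective: faster, asymptotic).

-- ===== PORT A =====
-- normalize_transcript_for_dedupe: "".join(ch for ch in (text or "").lower().strip() if ch.isalnum())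
def pvNormA (text : String) : List Char :=
  let t := if text = "" then "" else text     -- (text or "")
  (PySem.Chars.strip (PySem.Chars.lower t.toList)).filter PySem.Chars.isalnum

def find_longest_normalized_overlap (previous_text : String) (current_text : String) : Int :=
  let previous := pvNormA previous_text
  let current := pvNormA current_text
  if previous = [] ∨ current = [] then 0
  else
    let max_len : Int := min (previous.length : Int) (current.length : Int)
    -- for size in range(max_len, 12, -1): if previous[-size:] == current[:size]: return size
    match (PySem.List.pyRange max_len 12 (-1)).find? (fun size =>
        PySem.List.slice previous (some (-size)) none == PySem.List.slice current none (some size)) with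
    | some size => size
    | none => 0

-- ===== PORT B =====
-- _normalize: "".join(ch for ch in text.lower() if ch.isalnum())
def pvNormB (text : String) : List Char :=
  (PySem.Chars.lower text.toList).filter PySem.Chars.isalnum

-- while k > 0 and s[i] != s[k]: k = pi[k-1]
-- (the `min … (k-1)` is only a termination guard; the invariant pi[k-1] < k makes it exact)
def pvKmpWhile (s : List Char) (pi : List Nat) (i : Nat) (k : Nat) : Nat :=
  if k = 0 then 0
  else if s.getD i ' ' = s.getD k ' ' then k
  else pvKmpWhile s pi i (min (pi.getD (k-1) 0) (k-1))
termination_by k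
decreasing_by omega

-- for i in range(1, len(s)): …; if s[i] == s[k]: k += 1; pi[i] = k
def pvKmpOuter (s : List Char) (pi : List Nat) (i : Nat) (k : Nat) : Nat :=
  if i < s.length then
    let k1 := pvKmpWhile s pi i k
    let k2 := if s.getD i ' ' = s.getD k1 ' ' then k1 + 1 else k1
    pvKmpOuter s (pi.set i k2) (i+1) k2
  else k
termination_by s.length - i

def find_longest_normalized_overlap_alt (previous_text : String) (current_text : String) : Int :=
  let previous := pvNormB previous_text
  let current := pvNormB current_text
  let s := current ++ Char.ofNat 0 :: previous      -- current + "\x00" + previous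
  let k := pvKmpOuter s (List.replicate s.length 0) 1 0
  if k > 12 then (k : Int) else 0

-- ===== PRECONDITION & SPEC =====
def Spec_find_longest_normalized_overlap (previous_text : String) (current_text : String) (out : Int) : Prop := out = find_longest_normalized_overlap_alt previous_text current_text
instance (previous_text : String) (current_text : String) (out : Int) : Decidable (Spec_find_longest_normalized_overlap previous_text current_text out) := by unfold Spec_find_longest_normalized_overlap; infer_instance

-- ===== CLAIM (what is proved, stated in full; the proofs are below) =====
def Claim_equal_find_longest_normalized_overlap : Prop := ∀ (previous_text : String) (current_text : String), Dom_find_longest_normalized_overlap previous_text current_text → Spec_find_longest_normalized_overlap previous_text current_text (find_longest_normalized_overlap previous_text current_text)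

-- ===== LEMMAS AND PROOFS =====

-- L is a (proper) border length of t: a proper prefix of t that is also a suffix
def pvBorder (t : List Char) (L : Nat) : Bool :=
  decide (L < t.length) && decide (t.take L = t.drop (t.length - L))

-- the longest proper border length of t
def pvBmax (t : List Char) : Nat := Nat.findGreatest (fun L => pvBorder t L = true) t.length

theorem pvBorder_zero {t : List Char} (h : t ≠ []) : pvBorder t 0 = true := by
  simp [pvBorder, List.length_pos_iff, h]

theorem pvBorder_lt {t : List Char} {L : Nat} (h : pvBorder t L = true) : L < t.length := by
  simp [pvBorder] at h; exact h.1

theorem pvBorder_eq {t : List Char} {L : Nat} (h : pvBorder t L = true) :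
    t.take L = t.drop (t.length - L) := by
  simp [pvBorder] at h; exact h.2

theorem pvBmax_border {t : List Char} (h : t ≠ []) : pvBorder t (pvBmax t) = true := by
  have h0 : pvBorder t 0 = true := pvBorder_zero h
  exact Nat.findGreatest_spec (P := fun L => pvBorder t L = true) (Nat.zero_le _) h0

theorem pvBmax_ge {t : List Char} {L : Nat} (h : pvBorder t L = true) : L ≤ pvBmax t := by
  exact Nat.le_findGreatest (P := fun L => pvBorder t L = true) (le_of_lt (pvBorder_lt h)) h

-- border of a border is a border
theorem pvBorder_trans {t : List Char} {m j : Nat}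
    (hm : pvBorder t m = true) (hj : pvBorder (t.take m) j = true) : pvBorder t j = true := by
  have hmlt := pvBorder_lt hm
  have hme := pvBorder_eq hm
  have hjlt := pvBorder_lt hj
  have hje := pvBorder_eq hj
  rw [List.length_take] at hjlt hje
  have hjm : j < m := lt_of_lt_of_le hjlt (min_le_left _ _)
  simp only [pvBorder, Bool.and_eq_true, decide_eq_true_eq]
  refine ⟨lt_trans hjm hmlt, ?_⟩
  have h1 : t.take j = (t.take m).take j := by
    rw [List.take_take]; congr 1; omega
  rw [h1, hje, hme, List.drop_drop]
  congr 1
  omega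

-- a shorter border is a border of a longer border
theorem pvBorder_mono {t : List Char} {m j : Nat}
    (hm : pvBorder t m = true) (hj : pvBorder t j = true) (hjm : j < m) :
    pvBorder (t.take m) j = true := by
  have hmlt := pvBorder_lt hm
  have hme := pvBorder_eq hm
  have hje := pvBorder_eq hj
  simp only [pvBorder, Bool.and_eq_true, decide_eq_true_eq, List.length_take]
  refine ⟨by omega, ?_⟩
  have hmin : min m t.length = m := min_eq_left hmlt.le
  rw [hmin, List.take_take, min_eq_left hjm.le, hje, hme, List.drop_drop]
  congr 1
  omega

-- extension: borders of s.take (i+1) of positive length are extended borders of s.take i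
theorem pvBorder_ext {s : List Char} {i m : Nat} (hi : i < s.length) :
    pvBorder (s.take (i+1)) (m+1) = true ↔
      (pvBorder (s.take i) m = true ∧ s.getD m ' ' = s.getD i ' ') := by
  have hlen : (s.take i).length = i := by rw [List.length_take]; omega
  have hlen' : (s.take (i+1)).length = i + 1 := by rw [List.length_take]; omega
  have hsucc : s.take (i+1) = s.take i ++ [s.getD i ' '] := by
    rw [List.take_add_one]
    congr 1
    rw [List.getElem?_eq_getElem hi]
    simp [List.getD, List.getElem?_eq_getElem hi]
  constructor
  · intro h
    have hmlt : m + 1 < i + 1 := by have := pvBorder_lt h; omega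
    have hm : m < i := by omega
    have he := pvBorder_eq h
    rw [hlen'] at he
    rw [hsucc] at he
    rw [List.take_append_of_le_length (by omega)] at he
    have hdr : (s.take i ++ [s.getD i ' ']).drop (i+1-(m+1)) =
        (s.take i).drop (i - m) ++ [s.getD i ' '] := by
      rw [List.drop_append_of_le_length (by omega)]
      congr 2
      omega
    rw [hdr] at he
    have htsucc : (s.take i).take (m+1) = (s.take i).take m ++ [s.getD m ' '] := by
      have hmi : m < (s.take i).length := by omega
      rw [List.take_add_one]
      congr 1
      rw [List.getElem?_eq_getElem hmi]
      simp [List.getD, List.getElem?_eq_getElem (by omega : m < s.length),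
        List.getElem_take]
    rw [htsucc] at he
    have hlens : ((s.take i).take m).length = ((s.take i).drop (i - m)).length := by
      simp [hlen]
      omega
    obtain ⟨he1, he2⟩ := List.append_inj he (by simpa using hlens)
    have he2' : s.getD m ' ' = s.getD i ' ' := by simpa using he2
    refine ⟨?_, he2'⟩
    simp only [pvBorder, Bool.and_eq_true, decide_eq_true_eq]
    exact ⟨by omega, by rw [hlen]; exact he1⟩
  · rintro ⟨hb, hchar⟩
    have hm : m < i := by have := pvBorder_lt hb; omega
    have he := pvBorder_eq hb
    rw [hlen] at he
    simp only [pvBorder, Bool.and_eq_true, decide_eq_true_eq]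
    refine ⟨by omega, ?_⟩
    rw [hlen', hsucc]
    rw [List.take_append_of_le_length (by omega)]
    have hdr : (s.take i ++ [s.getD i ' ']).drop (i+1-(m+1)) =
        (s.take i).drop (i - m) ++ [s.getD i ' '] := by
      rw [List.drop_append_of_le_length (by omega)]
      congr 2
      omega
    rw [hdr]
    have htsucc : (s.take i).take (m+1) = (s.take i).take m ++ [s.getD m ' '] := by
      have hmi : m < (s.take i).length := by omega
      rw [List.take_add_one]
      congr 1
      rw [List.getElem?_eq_getElem hmi]
      simp [List.getD, List.getElem?_eq_getElem (by omega : m < s.length),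
        List.getElem_take]
    rw [htsucc, he, hchar]

-- while-loop: descends the border chain to the longest extendable border
theorem pvWhileSpec (s : List Char) (i : Nat) (pi : List Nat)
    (hGood : ∀ j, j < i → pi.getD j 0 = pvBmax (s.take (j+1)))
    (h1 : 1 ≤ i) (hi : i ≤ s.length) :
    ∀ k, pvBorder (s.take i) k = true →
      pvBorder (s.take i) (pvKmpWhile s pi i k) = true ∧
      pvKmpWhile s pi i k ≤ k ∧
      (pvKmpWhile s pi i k = 0 ∨ s.getD i ' ' = s.getD (pvKmpWhile s pi i k) ' ') ∧
      (∀ m, pvBorder (s.take i) m = true → m ≤ k → s.getD i ' ' = s.getD m ' ' →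
        m ≤ pvKmpWhile s pi i k) := by
  intro k
  induction k using Nat.strong_induction_on with
  | _ k ih =>
    intro hk
    have hne : s.take i ≠ [] := by
      have : 0 < (s.take i).length := by rw [List.length_take]; omega
      exact List.ne_nil_of_length_pos this
    have heq : pvKmpWhile s pi i k =
        if k = 0 then 0 else if s.getD i ' ' = s.getD k ' ' then k
        else pvKmpWhile s pi i (min (pi.getD (k-1) 0) (k-1)) := by
      rw [pvKmpWhile]
    by_cases h0 : k = 0
    · subst h0
      rw [if_pos rfl] at heq
      rw [heq]
      exact ⟨pvBorder_zero hne, le_refl _, Or.inl rfl, fun m _ hm _ => hm⟩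
    · rw [if_neg h0] at heq
      by_cases hEq : s.getD i ' ' = s.getD k ' '
      · rw [if_pos hEq] at heq
        rw [heq]
        exact ⟨hk, le_refl _, Or.inr hEq, fun m _ hm _ => hm⟩
      · rw [if_neg hEq] at heq
        have hki : k < i := by
          have := pvBorder_lt hk
          rw [List.length_take] at this
          omega
        have hpi : pi.getD (k-1) 0 = pvBmax (s.take k) := by
          have := hGood (k-1) (by omega)
          rwa [Nat.sub_add_cancel (by omega)] at this
        have hknil : s.take k ≠ [] := by
          have : 0 < (s.take k).length := by rw [List.length_take]; omega
          exact List.ne_nil_of_length_pos this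
        have hbb := pvBmax_border hknil
        have hblt : pvBmax (s.take k) < k := by
          have := pvBorder_lt hbb
          rw [List.length_take] at this
          omega
        have hk2 : min (pi.getD (k-1) 0) (k-1) = pvBmax (s.take k) := by
          rw [hpi]
          omega
        rw [hk2] at heq
        have htk : (s.take i).take k = s.take k := by
          rw [List.take_take, min_eq_left hki.le]
        have hb2 : pvBorder (s.take i) (pvBmax (s.take k)) = true := by
          apply pvBorder_trans hk
          rw [htk]
          exact hbb
        obtain ⟨P1, P2, P3, P4⟩ := ih _ hblt hb2
        rw [heq]
        refine ⟨P1, le_trans P2 (by omega), P3, ?_⟩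
        intro m hmB hmk hmc
        by_cases hmk2 : m ≤ pvBmax (s.take k)
        · exact P4 m hmB hmk2 hmc
        · exfalso
          have hmne : m ≠ k := by
            intro h
            rw [h] at hmc
            exact hEq hmc
          have hmlt : m < k := by omega
          have : pvBorder (s.take k) m = true := by
            rw [← htk]
            exact pvBorder_mono hk hmB hmlt
          exact hmk2 (pvBmax_ge this)

-- outer loop: maintains k = longest border of the processed prefix
theorem pvOuterSpec (s : List Char) : ∀ (d i : Nat) (pi : List Nat) (k : Nat),
    s.length - i = d → 1 ≤ i → i ≤ s.length → pi.length = s.length →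
    (∀ j, j < i → pi.getD j 0 = pvBmax (s.take (j+1))) →
    k = pvBmax (s.take i) →
    pvKmpOuter s pi i k = pvBmax s := by
  intro d
  induction d with
  | zero =>
    intro i pi k hd h1 hi hlen hGood hk
    have hieq : i = s.length := by omega
    rw [pvKmpOuter, if_neg (by omega)]
    rw [hk, hieq, List.take_of_length_le (le_refl _)]
  | succ d ih =>
    intro i pi k hd h1 hi hlen hGood hk
    have hi' : i < s.length := by omega
    have hne : s.take i ≠ [] := by
      have : 0 < (s.take i).length := by rw [List.length_take]; omega
      exact List.ne_nil_of_length_pos this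
    have hne' : s.take (i+1) ≠ [] := by
      have : 0 < (s.take (i+1)).length := by rw [List.length_take]; omega
      exact List.ne_nil_of_length_pos this
    have hkb : pvBorder (s.take i) k = true := by rw [hk]; exact pvBmax_border hne
    obtain ⟨W1, W2, W3, W4⟩ := pvWhileSpec s i pi hGood h1 (le_of_lt hi') k hkb
    set k1 := pvKmpWhile s pi i k with hk1def
    have hk2 : (if s.getD i ' ' = s.getD k1 ' ' then k1 + 1 else k1) =
        pvBmax (s.take (i+1)) := by
      by_cases hif : s.getD i ' ' = s.getD k1 ' '
      · rw [if_pos hif]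
        have hbext : pvBorder (s.take (i+1)) (k1+1) = true :=
          (pvBorder_ext hi').mpr ⟨W1, hif.symm⟩
        have hle : k1 + 1 ≤ pvBmax (s.take (i+1)) := pvBmax_ge hbext
        have hge : pvBmax (s.take (i+1)) ≤ k1 + 1 := by
          rcases Nat.eq_zero_or_pos (pvBmax (s.take (i+1))) with h | h
          · omega
          · obtain ⟨m, hm⟩ := Nat.exists_eq_add_of_lt h
            rw [Nat.zero_add] at hm
            have hbM := pvBmax_border hne'
            rw [hm] at hbM
            obtain ⟨hmb, hmc⟩ := (pvBorder_ext hi').mp hbM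
            have hmk : m ≤ k := by rw [hk]; exact pvBmax_ge hmb
            have := W4 m hmb hmk hmc.symm
            omega
        omega
      · rw [if_neg hif]
        have hk10 : k1 = 0 := by
          rcases W3 with h | h
          · exact h
          · exact absurd h hif
        have hM0 : pvBmax (s.take (i+1)) = 0 := by
          by_contra hM
          obtain ⟨m, hm⟩ := Nat.exists_eq_add_of_lt (Nat.pos_of_ne_zero hM)
          rw [Nat.zero_add] at hm
          have hbM := pvBmax_border hne'
          rw [hm] at hbM
          obtain ⟨hmb, hmc⟩ := (pvBorder_ext hi').mp hbM
          have hmk : m ≤ k := by rw [hk]; exact pvBmax_ge hmb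
          have := W4 m hmb hmk hmc.symm
          have hm0 : m = 0 := by omega
          rw [hm0] at hmc
          rw [hk10] at hif
          exact hif hmc.symm
        omega
    rw [pvKmpOuter, if_pos hi']
    rw [← hk1def]
    set k2 := if s.getD i ' ' = s.getD k1 ' ' then k1 + 1 else k1 with hk2def
    apply ih (i+1) (pi.set i k2) k2 (by omega) (by omega) (by omega)
      (by rw [List.length_set]; exact hlen)
    · intro j hj
      rcases Nat.lt_or_ge j i with hji | hji
      · have : (pi.set i k2).getD j 0 = pi.getD j 0 := by
          simp [List.getD, List.getElem?_set_ne (by omega : i ≠ j)]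
        rw [this]
        exact hGood j hji
      · have hjeq : j = i := by omega
        subst hjeq
        have : (pi.set j k2).getD j 0 = k2 := by
          simp [List.getD, List.getElem?_set_self (by omega : j < pi.length)]
        rw [this]
        exact hk2
    · exact hk2

theorem pvKmp_eq_bmax (s : List Char) (h : 1 ≤ s.length) :
    pvKmpOuter s (List.replicate s.length 0) 1 0 = pvBmax s := by
  have hb1 : pvBmax (s.take 1) = 0 := by
    by_contra hM
    have hne : s.take 1 ≠ [] := by
      have : 0 < (s.take 1).length := by rw [List.length_take]; omega
      exact List.ne_nil_of_length_pos this
    have := pvBorder_lt (pvBmax_border hne)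
    rw [List.length_take] at this
    omega
  apply pvOuterSpec s (s.length - 1) 1 _ 0 rfl (le_refl _) h (List.length_replicate ..)
  · intro j hj
    have : j = 0 := by omega
    subst this
    have h0 : 0 < s.length := by omega
    simp [List.getD, h0, hb1]
  · exact hb1.symm

-- the sentinel occurs in c ++ sep :: p exactly at position c.length
theorem pvSepUnique {cu pr : List Char} (hc : Char.ofNat 0 ∉ cu) (hp : Char.ofNat 0 ∉ pr)
    {j : Nat} (hj : j < (cu ++ Char.ofNat 0 :: pr).length)
    (h : (cu ++ Char.ofNat 0 :: pr).getD j ' ' = Char.ofNat 0) : j = cu.length := by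
  rcases Nat.lt_trichotomy j cu.length with hj1 | hj1 | hj1
  · exfalso
    have h1 : (cu ++ Char.ofNat 0 :: pr)[j]? = cu[j]? := List.getElem?_append_left hj1
    rw [List.getD, h1, List.getElem?_eq_getElem hj1] at h
    simp at h
    exact hc (h ▸ List.getElem_mem hj1)
  · exact hj1
  · exfalso
    have hle : cu.length ≤ j := le_of_lt hj1
    have h1 : (cu ++ Char.ofNat 0 :: pr)[j]? = (Char.ofNat 0 :: pr)[j - cu.length]? :=
      List.getElem?_append_right hle
    obtain ⟨m, hm⟩ := Nat.exists_eq_add_of_lt hj1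
    have hjm : j - cu.length = m + 1 := by omega
    rw [List.getD, h1, hjm] at h
    simp only [List.getElem?_cons_succ] at h
    have hmp : m < pr.length := by simp at hj; omega
    rw [List.getElem?_eq_getElem hmp] at h
    simp at h
    exact hp (h ▸ List.getElem_mem hmp)

-- borders of cu ++ sep :: pr of positive length are exactly the suffix/prefix overlaps
theorem pvBorder_iff_overlap {cu pr : List Char} (hc : Char.ofNat 0 ∉ cu) (hp : Char.ofNat 0 ∉ pr)
    {L : Nat} :
    pvBorder (cu ++ Char.ofNat 0 :: pr) L = true ↔
      (L ≤ cu.length ∧ L ≤ pr.length ∧ cu.take L = pr.drop (pr.length - L)) := by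
  have hs : (cu ++ Char.ofNat 0 :: pr) = (cu ++ [Char.ofNat 0]) ++ pr := by simp
  have hlen : (cu ++ Char.ofNat 0 :: pr).length = cu.length + pr.length + 1 := by simp; omega
  have htake : ∀ {M : Nat}, M ≤ cu.length →
      (cu ++ Char.ofNat 0 :: pr).take M = cu.take M := by
    intro M hM
    rw [List.take_append_of_le_length hM]
  have hdrop : ∀ {M : Nat}, M ≤ pr.length →
      (cu ++ Char.ofNat 0 :: pr).drop ((cu ++ Char.ofNat 0 :: pr).length - M) =
        pr.drop (pr.length - M) := by
    intro M hM
    rw [hs]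
    have harith : ((cu ++ [Char.ofNat 0]) ++ pr).length - M =
        (cu ++ [Char.ofNat 0]).length + (pr.length - M) := by simp; omega
    rw [harith, List.drop_append]
    simp
  constructor
  · intro hb
    have hlt := pvBorder_lt hb
    have heq := pvBorder_eq hb
    have hLc : L ≤ cu.length := by
      by_contra hLc'
      have hLc : cu.length < L := by omega
      have hgd := congrArg (fun l => l.getD cu.length ' ') heq
      simp only [List.getD] at hgd
      rw [List.getElem?_take_of_lt hLc, List.getElem?_drop] at hgd
      have hsepAt : (cu ++ Char.ofNat 0 :: pr)[cu.length]? = some (Char.ofNat 0) := by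
        rw [List.getElem?_append_right (le_refl _)]
        simp
      rw [hsepAt] at hgd
      have hidx : (cu ++ Char.ofNat 0 :: pr).length - L + cu.length <
          (cu ++ Char.ofNat 0 :: pr).length := by omega
      have := pvSepUnique hc hp hidx (by
        simp only [List.getD]
        rw [← hgd]
        simp)
      omega
    have hLp : L ≤ pr.length := by
      by_contra hLp'
      have hLp : pr.length < L := by omega
      set j := L - 1 - pr.length with hjdef
      have hjL : j < L := by omega
      have hgd := congrArg (fun l => l.getD j ' ') heq
      simp only [List.getD] at hgd
      rw [List.getElem?_take_of_lt hjL, List.getElem?_drop] at hgd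
      have harith : (cu ++ Char.ofNat 0 :: pr).length - L + j = cu.length := by
        rw [hlen] at hlt ⊢
        omega
      rw [harith] at hgd
      have hsepAt : (cu ++ Char.ofNat 0 :: pr)[cu.length]? = some (Char.ofNat 0) := by
        rw [List.getElem?_append_right (le_refl _)]
        simp
      rw [hsepAt] at hgd
      have hjn : j < (cu ++ Char.ofNat 0 :: pr).length := by omega
      have := pvSepUnique hc hp hjn (by
        simp only [List.getD]
        rw [hgd]
        simp)
      rw [hlen] at hlt
      omega
    refine ⟨hLc, hLp, ?_⟩
    rw [← htake hLc, ← hdrop hLp]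
    exact heq
  · rintro ⟨hLc, hLp, he⟩
    simp only [pvBorder, Bool.and_eq_true, decide_eq_true_eq]
    constructor
    · rw [hlen]; omega
    · rw [htake hLc, hdrop hLp]
      exact he

-- find? over a descending consecutive range returns the greatest element satisfying f
theorem pvFindDescSome (f : Int → Bool) : ∀ (d : Nat) (a b x : Int), (a - b).toNat = d →
    b < x → x ≤ a → f x = true → (∀ y, x < y → y ≤ a → f y = false) →
    (PySem.List.pyRange a b (-1)).find? f = some x := by
  intro d
  induction d with
  | zero =>
    intro a b x hd hbx hxa _ _
    omega
  | succ d ih =>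
    intro a b x hd hbx hxa hfx hmax
    have hba : b < a := lt_of_lt_of_le hbx hxa
    rw [PySem.List.pyRange_neg_one_cons hba]
    by_cases hax : x = a
    · subst hax
      rw [List.find?_cons_of_pos hfx]
    · have hxa' : x < a := lt_of_le_of_ne hxa hax
      rw [List.find?_cons_of_neg (by rw [hmax a hxa' (le_refl _)]; simp)]
      exact ih (a-1) b x (by omega) hbx (by omega) hfx (fun y hy1 hy2 => hmax y hy1 (by omega))

-- whitespace is never alphanumeric, so stripping before the filter is a no-op
theorem pvSpaceNotAlnum (ch : Char) (h : PySem.Chars.isspace ch = true) :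
    PySem.Chars.isalnum ch = false := by
  simp only [PySem.Chars.isspace, PySem.Chars.isalnum, PySem.Chars.isalpha, PySem.Chars.isdigit,
    PySem.Chars.isupper, PySem.Chars.islower, Char.le_def, UInt32.le_iff_toNat_le,
    Bool.or_eq_true, Bool.and_eq_true, decide_eq_true_eq, Bool.or_eq_false_iff,
    Bool.and_eq_false_iff, decide_eq_false_iff_not, not_le, Char.toNat,
    Char.reduceVal, UInt32.reduceToNat] at *
  omega

theorem pvFilter_dropWhile (l : List Char) :
    (l.dropWhile PySem.Chars.isspace).filter PySem.Chars.isalnum =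
      l.filter PySem.Chars.isalnum := by
  induction l with
  | nil => rfl
  | cons a l ih =>
    by_cases ha : PySem.Chars.isspace a = true
    · rw [List.dropWhile_cons_of_pos ha, ih, List.filter_cons_of_neg (by simp [pvSpaceNotAlnum a ha])]
    · rw [List.dropWhile_cons_of_neg (by simp [ha])]

theorem pvFilter_strip (l : List Char) :
    (PySem.Chars.strip l).filter PySem.Chars.isalnum = l.filter PySem.Chars.isalnum := by
  unfold PySem.Chars.strip PySem.Chars.rstrip PySem.Chars.lstrip
  rw [List.filter_reverse, pvFilter_dropWhile, List.filter_reverse, List.reverse_reverse,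
    pvFilter_dropWhile]

theorem pvNorm_eq (t : String) : pvNormA t = pvNormB t := by
  unfold pvNormA pvNormB
  by_cases h : t = "" <;> simp only [h, if_true, if_false] <;> exact pvFilter_strip _

theorem pvNormB_no_sep (t : String) : Char.ofNat 0 ∉ pvNormB t := by
  intro h
  unfold pvNormB at h
  have := List.of_mem_filter h
  have hfalse : PySem.Chars.isalnum (Char.ofNat 0) = false := by decide
  rw [hfalse] at this
  exact Bool.false_ne_true this

-- ===== VERDICT (by name: the statement is the Claim_ definition above) =====
theorem find_longest_normalized_overlap_spec : Claim_equal_find_longest_normalized_overlap := by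
  intro prev cur _hdom
  unfold Spec_find_longest_normalized_overlap
  unfold find_longest_normalized_overlap find_longest_normalized_overlap_alt
  simp only [pvNorm_eq]
  set pr := pvNormB prev with hprdef
  set cu := pvNormB cur with hcudef
  set s := cu ++ Char.ofNat 0 :: pr with hsdef
  have hslen : 1 ≤ s.length := by rw [hsdef]; simp; omega
  rw [pvKmp_eq_bmax s hslen]
  set K := pvBmax s with hKdef
  have hsne : s ≠ [] := List.ne_nil_of_length_pos (by omega)
  have hc : Char.ofNat 0 ∉ cu := pvNormB_no_sep cur
  have hp : Char.ofNat 0 ∉ pr := pvNormB_no_sep prev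
  have hKov := (pvBorder_iff_overlap hc hp).mp (pvBmax_border hsne)
  rw [← hsdef, ← hKdef] at hKov
  have hOvLe : ∀ m : Nat, m ≤ cu.length → m ≤ pr.length →
      cu.take m = pr.drop (pr.length - m) → m ≤ K :=
    fun m h1 h2 h3 => pvBmax_ge ((pvBorder_iff_overlap hc hp).mpr ⟨h1, h2, h3⟩)
  have hfalse : ∀ y : Int, (K:Int) < y → y ≤ min (pr.length:Int) (cu.length:Int) →
      (PySem.List.slice pr (some (-y)) none == PySem.List.slice cu none (some y)) = false := by
    intro y hy1 hy2
    have hKnn : (0:Int) ≤ (K:Int) := Int.natCast_nonneg K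
    have hy0 : (0:Int) < y := by omega
    have hyc : ((y.toNat : Int)) = y := Int.toNat_of_nonneg hy0.le
    have hbounds := le_min_iff.mp hy2
    have hmp : y.toNat ≤ pr.length := by omega
    have hmc : y.toNat ≤ cu.length := by omega
    rw [← hyc, PySem.List.slice_from_neg_natCast pr y.toNat (by omega),
      PySem.List.slice_to cu (by omega)]
    simp only [Int.toNat_natCast]
    apply beq_eq_false_iff_ne.mpr
    intro heq
    have := hOvLe y.toNat hmc hmp heq.symm
    omega
  by_cases hemp : pr = [] ∨ cu = []
  · rw [if_pos hemp]
    have hK12 : ¬ 12 < K := by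
      rcases hemp with h | h
      · have := hKov.2.1; rw [h] at this; simp at this; omega
      · have := hKov.1; rw [h] at this; simp at this; omega
    rw [if_neg hK12]
  · rw [if_neg hemp]
    by_cases hbig : 12 < K
    · rw [if_pos hbig]
      have hfind : (PySem.List.pyRange (min (pr.length:Int) (cu.length:Int)) 12 (-1)).find?
          (fun size => PySem.List.slice pr (some (-size)) none ==
            PySem.List.slice cu none (some size)) = some (K:Int) := by
        apply pvFindDescSome _ ((min (pr.length:Int) (cu.length:Int)) - 12).toNat _ _ _ rfl
        · exact_mod_cast hbig
        · rw [le_min_iff]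
          constructor
          · exact_mod_cast hKov.2.1
          · exact_mod_cast hKov.1
        · have hKpos : 0 < K := by omega
          rw [PySem.List.slice_from_neg_natCast pr K hKpos,
            PySem.List.slice_to cu (Int.natCast_nonneg K)]
          simp only [Int.toNat_natCast]
          exact beq_iff_eq.mpr hKov.2.2.symm
        · intro y hy1 hy2
          exact hfalse y hy1 hy2
      rw [hfind]
    · rw [if_neg hbig]
      have hfind : (PySem.List.pyRange (min (pr.length:Int) (cu.length:Int)) 12 (-1)).find?
          (fun size => PySem.List.slice pr (some (-size)) none ==
            PySem.List.slice cu none (some size)) = none := by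
        rw [List.find?_eq_none]
        intro y hymem
        rw [PySem.List.mem_pyRange_neg_one] at hymem
        simp only [Bool.not_eq_true]
        exact hfalse y (by omega) hymem.2
      rw [hfind]
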